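-- pv_equiv track=rewrite | github.com/theodubus/UTC-IA02 | Projet/utils/clauses_combin.py | at_most_n
-- ===== SOURCE A (Python) =====
-- from itertools import combinations
--
-- def at_most_n(n, liste):
--     """
--     Renvoie les clauses permettant de modeliser au plus n elements de la liste
--     """
--     if n < 0 or n > len(liste):
--         raise ValueError("n doit etre compris entre 0 et la taille de la liste")
--
--     if n == len(liste):
--         return []
--
--     clauses = []
--     listeNeg = [-i for i in liste]
--     for c in combinations(listeNeg, n+1):
--         clauses.append(list(c))
--     return clauses
-- ===== SOURCE B (Python) =====
-- def at_most_n(n, liste):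
--     """
--     Renvoie les clauses permettant de modeliser au plus n elements de la liste
--     """
--     if n < 0 or n > len(liste):
--         raise ValueError("n doit etre compris entre 0 et la taille de la liste")
--
--     if n == len(liste):
--         return []
--
--     def rec(xs, prefix, k, acc):
--         # pick elements of xs in order; negate at pick time
--         if k == 0:
--             acc.append(prefix)
--             return acc
--         if not xs:
--             return acc
--         acc = rec(xs[1:], prefix + [-xs[0]], k - 1, acc)
--         return rec(xs[1:], prefix, k, acc)
--
--     return rec(liste, [], n + 1, [])
-- ===== Notes on version B (the rewrite author's own statement) =====
-- stated objective: alternative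
-- what changed: Replaces itertools.combinations over a pre-negated copy of the list with a hand-written accumulator-passing include/exclude recursion that negates each element at pick time, emitting (n+1)-clauses in the same lexicographic order.
import Mathlib
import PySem

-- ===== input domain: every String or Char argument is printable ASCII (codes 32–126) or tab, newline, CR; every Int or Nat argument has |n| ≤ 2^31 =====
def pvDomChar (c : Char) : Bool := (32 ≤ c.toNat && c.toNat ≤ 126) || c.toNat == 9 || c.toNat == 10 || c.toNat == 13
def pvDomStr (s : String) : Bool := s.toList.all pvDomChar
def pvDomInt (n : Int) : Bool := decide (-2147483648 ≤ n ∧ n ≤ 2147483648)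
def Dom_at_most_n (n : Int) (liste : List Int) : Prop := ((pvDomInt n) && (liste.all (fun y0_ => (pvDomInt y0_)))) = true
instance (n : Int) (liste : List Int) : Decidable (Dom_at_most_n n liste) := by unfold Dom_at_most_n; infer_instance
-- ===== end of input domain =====

-- B replaces itertools.combinations over a pre-negated list copy by an accumulator-passing
-- include/exclude recursion that negates each element at pick time (alternative decomposition, same cost).


-- ===== PORT A =====
-- itertools.combinations(xs, k), ported by hand step for step: combinations of k elements
-- of xs, in lexicographic order of the chosen positions (exact for list input).
def pyCombinations (k : Nat) (xs : List Int) : List (List Int) :=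
  match k, xs with
  | 0, _ => [[]]
  | _ + 1, [] => []
  | k + 1, x :: rest =>
      (pyCombinations k rest).map (fun c => x :: c) ++ pyCombinations (k + 1) rest

-- literal transliteration of A; the ValueError branch is excluded by Pre_at_most_n
def at_most_n (n : Int) (liste : List Int) : List (List Int) :=
  if n < 0 ∨ n > liste.length then []   -- Python: raise ValueError (outside Pre_)
  else if n = liste.length then []
  else
    let listeNeg := liste.map (fun i => -i)
    (pyCombinations (n + 1).toNat listeNeg).foldl (fun clauses c => clauses ++ [c]) []

-- ===== PORT B =====
-- literal transliteration of Source B's rec: include/exclude on the head, negation at pick time,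
-- completed clauses appended to the accumulator
def altRec (xs : List Int) (pre : List Int) (k : Nat) (acc : List (List Int)) : List (List Int) :=
  match k, xs with
  | 0, _ => acc ++ [pre]
  | _ + 1, [] => acc
  | k + 1, x :: rest => altRec rest pre (k + 1) (altRec rest (pre ++ [-x]) k acc)

def at_most_n_alt (n : Int) (liste : List Int) : List (List Int) :=
  if n < 0 ∨ n > liste.length then []   -- Python: raise ValueError (outside Pre_)
  else if n = liste.length then []
  else altRec liste [] (n + 1).toNat []

-- ===== PRECONDITION & SPEC =====
-- Pre_ excludes exactly the inputs on which A raises ValueError (n < 0 or n > len(liste))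
def Pre_at_most_n (n : Int) (liste : List Int) : Prop := 0 ≤ n ∧ n ≤ liste.length
instance (n : Int) (liste : List Int) : Decidable (Pre_at_most_n n liste) := by unfold Pre_at_most_n; infer_instance
def pvWitness_at_most_n : Int × List Int := (1, [2, 3, 4])
def Spec_at_most_n (n : Int) (liste : List Int) (out : List (List Int)) : Prop := out = at_most_n_alt n liste
instance (n : Int) (liste : List Int) (out : List (List Int)) : Decidable (Spec_at_most_n n liste out) := by unfold Spec_at_most_n; infer_instance

-- ===== CLAIM (what is proved, stated in full; the proofs are below) =====
def Claim_equal_at_most_n : Prop := ∀ (n : Int) (liste : List Int), Dom_at_most_n n liste → Pre_at_most_n n liste → Spec_at_most_n n liste (at_most_n n liste)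

-- ===== LEMMAS AND PROOFS =====

-- B's recursion computes acc ++ (combinations of the negated suffix), each prefixed by pre
theorem altRec_eq (xs : List Int) :
    ∀ (k : Nat) (pre : List Int) (acc : List (List Int)),
      altRec xs pre k acc
        = acc ++ (pyCombinations k (xs.map (fun i => -i))).map (fun c => pre ++ c) := by
  induction xs with
  | nil =>
      intro k pre acc
      cases k <;> simp [altRec, pyCombinations]
  | cons x rest ih =>
      intro k pre acc
      cases k with
      | zero => simp [altRec, pyCombinations]
      | succ k =>
          simp [altRec, pyCombinations, ih, List.map_map, List.append_assoc,
                Function.comp]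

theorem foldl_append_id (l : List (List Int)) (acc : List (List Int)) :
    l.foldl (fun clauses c => clauses ++ [c]) acc = acc ++ l := by
  induction l generalizing acc with
  | nil => simp
  | cons h t ih => simp [List.foldl, ih]

-- ===== VERDICT (by name: the statement is the Claim_ definition above) =====
theorem at_most_n_spec : Claim_equal_at_most_n := by
  intro n liste _ _
  unfold Spec_at_most_n at_most_n at_most_n_alt
  split
  · rfl
  · split
    · rfl
    · rw [foldl_append_id, altRec_eq]; simp
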